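-- pv_equiv track=rewrite | github.com/AlekseyKravchuk/coursera_dstructs_and_algorithms_spec | 02_data_structures/week_4/4.5_longest_common_substring/4.5_longest_common_substring.py | get_substr_hashes
-- ===== SOURCE A (Python) =====
-- x = 29
--
-- def get_substr_hashes(s, win_len, p):
--     L = len(s)
--     coeffs = list(map(ord, s))
--     d = dict()
--
--     # precomputed values of x^(str_len-1) by given modulo
--     mult = pow(x, win_len - 1, p)
--
--     # Calculate the hash value of the first window
--     w = 0
--     for i in range(win_len):
--         w = (x * w + coeffs[i]) % p
--
--     # d[w] = (start_pos_of_substring, its_length)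
--     d[w] = (0, win_len)
--
--     # Calculate hashes for all substrings of length 'win_len' of a given string 's'
--     for i in range(1, L-win_len+1):
--         next_idx = i + win_len - 1
--         w = ((w - mult * coeffs[i - 1]) * x + coeffs[next_idx]) % p
--         d[w] = (i, win_len)
--     return d
-- ===== SOURCE B (Python) =====
-- x = 29
--
-- def get_substr_hashes(s, win_len, p):
--     coeffs = list(map(ord, s))
--     L = len(coeffs)
--     # prefix-hash table: H[k] = rolling hash of s[:k]
--     H = [0]
--     h = 0
--     for c in coeffs:
--         h = (h * x + c) % p
--         H.append(h)
--     pw = pow(x, win_len, p)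
--     d = dict()
--     d[H[win_len]] = (0, win_len)          # first window straight from the table
--     for i in range(1, L - win_len + 1):   # later windows by the subtraction formula
--         d[(H[i + win_len] - H[i] * pw) % p] = (i, win_len)
--     return d
-- ===== Notes on version B (the rewrite author's own statement) =====
-- stated objective: alternative
-- what changed: B builds a prefix-hash table once and computes each window's hash directly as (H[i+win_len]-H[i]*pow(x,win_len,p))%p, instead of A's single rolling value updated in place with a precomputed pow(x,win_len-1,p) multiplier.
import Mathlib
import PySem

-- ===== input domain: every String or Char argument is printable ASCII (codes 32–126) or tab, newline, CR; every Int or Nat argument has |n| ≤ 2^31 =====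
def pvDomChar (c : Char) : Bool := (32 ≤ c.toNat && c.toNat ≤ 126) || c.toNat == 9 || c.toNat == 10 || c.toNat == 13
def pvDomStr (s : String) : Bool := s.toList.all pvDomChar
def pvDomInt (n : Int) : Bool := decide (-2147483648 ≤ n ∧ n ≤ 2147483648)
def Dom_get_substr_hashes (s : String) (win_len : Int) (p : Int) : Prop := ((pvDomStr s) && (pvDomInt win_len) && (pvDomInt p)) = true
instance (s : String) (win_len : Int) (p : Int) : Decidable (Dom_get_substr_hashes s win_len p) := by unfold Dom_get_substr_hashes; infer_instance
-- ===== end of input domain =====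

-- B replaces A's single rolling hash value by a prefix-hash table read per window (same O(L) cost,
-- different decomposition); return values agree on all inputs where A returns normally.

-- ===== PORT A =====
-- Python pow(a, n, p): exact for n ≥ 0 (PySem.Int.powMod) and for n = -1 with gcd(a, p) = 1,
-- where the Bézout coefficient reduced mod p is exactly Python's unique modular inverse.
-- (n < -1, and n = -1 with gcd ≠ 1, only occur outside Pre_ — Python raises there.)
def pyPow3 (a n p : Int) : Int :=
  if 0 ≤ n then PySem.Int.powMod a n.toNat p
  else PySem.Int.mod (Int.gcdA a p) p

-- loop body of A's second loop (w update, then d[w] = (i, win_len))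
def pvAStep (c : List Int) (mult p W : Int) (wd : Int × PySem.Dict Int (Int × Int)) (i : Int) :
    Int × PySem.Dict Int (Int × Int) :=
  let next_idx := i + W - 1
  let w := PySem.Int.mod ((wd.1 - mult * PySem.List.pyGetD c (i - 1) 0) * 29
             + PySem.List.pyGetD c next_idx 0) p
  (w, wd.2.insert w (i, W))

def get_substr_hashes (s : String) (win_len : Int) (p : Int) : List (Int × Int × Int) :=
  let coeffs : List Int := s.toList.map (fun ch => (ch.toNat : Int))
  let L : Int := PySem.List.len coeffs
  let mult : Int := pyPow3 29 (win_len - 1) p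
  let w0 : Int := (PySem.List.pyRange 0 win_len 1).foldl
      (fun w i => PySem.Int.mod (29 * w + PySem.List.pyGetD coeffs i 0) p) 0
  let wd := (PySem.List.pyRange 1 (L - win_len + 1) 1).foldl (pvAStep coeffs mult p win_len)
      (w0, PySem.Dict.empty.insert w0 (0, win_len))
  wd.2.items

-- ===== PORT B =====
-- loop body of B's window loop (d[(H[i+win_len] - H[i]*pw) % p] = (i, win_len))
def pvBStep (H : List Int) (pw p W : Int) (d : PySem.Dict Int (Int × Int)) (i : Int) :
    PySem.Dict Int (Int × Int) :=
  d.insert (PySem.Int.mod (PySem.List.pyGetD H (i + W) 0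
      - PySem.List.pyGetD H i 0 * pw) p) (i, W)

def get_substr_hashes_alt (s : String) (win_len : Int) (p : Int) : List (Int × Int × Int) :=
  let coeffs : List Int := s.toList.map (fun ch => (ch.toNat : Int))
  let L : Int := PySem.List.len coeffs
  -- prefix-hash table: h is the running hash, H collects [0, hash s[:1], …, hash s[:L]]
  let hH : Int × List Int := coeffs.foldl
      (fun hH c =>
        let h := PySem.Int.mod (hH.1 * 29 + c) p
        (h, hH.2 ++ [h])) (0, ([0] : List Int))
  let H : List Int := hH.2
  let pw : Int := pyPow3 29 win_len p
  let d := PySem.Dict.empty.insert (PySem.List.pyGetD H win_len 0) (0, win_len)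
  ((PySem.List.pyRange 1 (L - win_len + 1) 1).foldl (pvBStep H pw p win_len) d).items

-- ===== PRECONDITION & SPEC =====
-- Pre_ = exactly the inputs where Python A returns normally: win_len within [0, len(s)] (else the
-- window indexing raises IndexError), p ≠ 0 (else pow/% raise), and for win_len = 0 the modulus
-- must not be a multiple of 29 (else pow(29, -1, p) raises ValueError: no modular inverse).
def Pre_get_substr_hashes (s : String) (win_len : Int) (p : Int) : Prop :=
  0 ≤ win_len ∧ win_len ≤ PySem.Str.len s ∧ p ≠ 0 ∧ (win_len = 0 → ¬ ((29:Int) ∣ p))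
instance (s : String) (win_len : Int) (p : Int) : Decidable (Pre_get_substr_hashes s win_len p) := by
  unfold Pre_get_substr_hashes; infer_instance

def pvWitness_get_substr_hashes : String × Int × Int := ("ab", 2, 7)

def Spec_get_substr_hashes (s : String) (win_len : Int) (p : Int) (out : List (Int × Int × Int)) : Prop := out = get_substr_hashes_alt s win_len p
instance (s : String) (win_len : Int) (p : Int) (out : List (Int × Int × Int)) : Decidable (Spec_get_substr_hashes s win_len p out) := by unfold Spec_get_substr_hashes; infer_instance

-- ===== CLAIM (what is proved, stated in full; the proofs are below) =====
def Claim_equal_get_substr_hashes : Prop := ∀ (s : String) (win_len : Int) (p : Int), Dom_get_substr_hashes s win_len p → Pre_get_substr_hashes s win_len p → Spec_get_substr_hashes s win_len p (get_substr_hashes s win_len p)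


-- ===== LEMMAS AND PROOFS =====

-- the shared hash step and the prefix hash of the first k characters
def pvStep (p h c : Int) : Int := PySem.Int.mod (h * 29 + c) p
def pvPref (c : List Int) (p : Int) (k : ℕ) : Int := (c.take k).foldl (pvStep p) 0
-- the hash A's rolling value and B's subtraction formula both produce for window i
def pvKey (c : List Int) (p pw : Int) (n i : ℕ) : Int :=
  PySem.Int.mod (pvPref c p (i + n) - pvPref c p i * pw) p

lemma pvFmodCongr {p a b : Int} (h : Int.ModEq p a b) : a.fmod p = b.fmod p := by
  rw [Int.fmod_eq_fmod_iff_fmod_sub_eq_zero]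
  exact Int.fmod_eq_zero_of_dvd ((Int.modEq_iff_dvd.mp h.symm))

lemma pvFmodModEq (p a : Int) : Int.ModEq p (a.fmod p) a :=
  Int.modEq_iff_dvd.mpr Int.dvd_self_sub_fmod

lemma pvModIsFmod (a p : Int) : PySem.Int.mod a p = a.fmod p := rfl

lemma pvPref_zero (c : List Int) (p : Int) : pvPref c p 0 = 0 := rfl

lemma pvPref_succ (c : List Int) (p : Int) (k : ℕ) (hk : k < c.length) :
    pvPref c p (k + 1) = pvStep p (pvPref c p k) (c.getD k 0) := by
  unfold pvPref
  rw [List.take_add_one, List.foldl_append]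
  simp [List.getElem?_eq_getElem hk]

lemma pvPref_fmod (c : List Int) (p : Int) (k : ℕ) (hk : k ≤ c.length) :
    (pvPref c p k).fmod p = pvPref c p k := by
  cases k with
  | zero => simp [pvPref_zero, Int.zero_fmod]
  | succ m =>
      rw [pvPref_succ c p m (by omega)]
      exact Int.fmod_fmod _ _

-- B's prefix-table fold produces exactly the scanl of pvStep
lemma pvFoldH (p : Int) (l : List Int) (h0 : Int) (acc : List Int) :
    l.foldl (fun hH c =>
        let h := PySem.Int.mod (hH.1 * 29 + c) p
        (h, hH.2 ++ [h])) (h0, acc)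
      = (l.foldl (pvStep p) h0, acc ++ (List.scanl (pvStep p) h0 l).tail) := by
  induction l generalizing h0 acc with
  | nil => simp
  | cons a l ih =>
      simp only [List.foldl_cons, List.scanl_cons]
      rw [ih]
      cases l <;> simp [pvStep, List.scanl_cons]

-- B's H list is the scanl of pvStep over the coefficients
lemma pvHeq (p : Int) (c : List Int) :
    (c.foldl (fun hH c =>
        let h := PySem.Int.mod (hH.1 * 29 + c) p
        (h, hH.2 ++ [h])) (0, ([0] : List Int))).2
      = List.scanl (pvStep p) 0 c := by
  rw [pvFoldH]
  cases c <;> simp [pvStep, List.scanl_cons]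

-- indexing a scanl: entry k is the fold over the first k elements
lemma pvScanlGetD {α : Type} (f : α → Int → α) (l : List Int) (b d : α) (k : ℕ)
    (hk : k ≤ l.length) :
    (List.scanl f b l).getD k d = (l.take k).foldl f b := by
  induction l generalizing b k with
  | nil =>
      have hk0 : k = 0 := by simpa using hk
      subst hk0; simp
  | cons a l ih =>
      cases k with
      | zero => simp
      | succ m =>
          rw [List.scanl_cons]
          simpa using ih (f b a) m (by simpa using hk)

lemma pvHgetD (c : List Int) (p : Int) (k : ℕ) (hk : k ≤ c.length) :
    PySem.List.pyGetD (List.scanl (pvStep p) 0 c) (k : Int) 0 = pvPref c p k := by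
  rw [PySem.List.pyGetD_natCast]
  exact pvScanlGetD (pvStep p) c 0 0 k hk

-- A's first-window loop computes the prefix hash of the first n characters
lemma pvFirstWin (c : List Int) (p : Int) (n : ℕ) (hn : n ≤ c.length) :
    (PySem.List.pyRange 0 (n : Int) 1).foldl
        (fun w i => PySem.Int.mod (29 * w + PySem.List.pyGetD c i 0) p) 0
      = pvPref c p n := by
  induction n with
  | zero => simp [PySem.List.pyRange_one_eq_nil, pvPref_zero]
  | succ m ih =>
      have h1 : ((m : Int) + 1) = ((m + 1 : ℕ) : Int) := by omega
      rw [← h1, PySem.List.pyRange_one_succ_right (by positivity), List.foldl_append]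
      rw [ih (by omega), pvPref_succ c p m (by omega)]
      simp [pvStep, PySem.List.pyGetD_natCast, mul_comm]

-- the congruence step: A's rolling update sends the hash of window t to the hash of window t+1
lemma pvKeyStep (c : List Int) (p mult pw : Int) (n t : ℕ)
    (hM : Int.ModEq p (29 * mult) (29 ^ n)) (hpw : Int.ModEq p pw (29 ^ n))
    (ht : t + 1 + n ≤ c.length) :
    PySem.Int.mod ((pvKey c p pw n t - mult * c.getD t 0) * 29 + c.getD (t + n) 0) p
      = pvKey c p pw n (t + 1) := by
  have hA1 : pvPref c p (t + n + 1) = (pvPref c p (t + n) * 29 + c.getD (t + n) 0).fmod p := by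
    rw [pvPref_succ c p (t + n) (by omega)]; rfl
  have hA0 : pvPref c p (t + 1) = (pvPref c p t * 29 + c.getD t 0).fmod p := by
    rw [pvPref_succ c p t (by omega)]; rfl
  set A1 := pvPref c p (t + n)
  set A0 := pvPref c p t
  set ct := c.getD t 0
  set cn := c.getD (t + n) 0
  have hkey : Int.ModEq p (pvKey c p pw n t) (A1 - A0 * 29 ^ n) := by
    refine (pvFmodModEq p _).trans ?_
    exact (Int.ModEq.refl A1).sub ((Int.ModEq.refl A0).mul hpw)
  rw [pvModIsFmod]
  apply pvFmodCongr
  unfold pvKey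
  rw [pvModIsFmod]
  have hL : Int.ModEq p ((pvKey c p pw n t - mult * ct) * 29 + cn)
      (29 * A1 + cn - 29 ^ (n + 1) * A0 - 29 ^ n * ct) := by
    calc (pvKey c p pw n t - mult * ct) * 29 + cn
        ≡ ((A1 - A0 * 29 ^ n) - mult * ct) * 29 + cn [ZMOD p] :=
          (((hkey.sub (Int.ModEq.refl (mult * ct))).mul_right 29).add_right cn)
      _ = 29 * A1 - 29 ^ n * 29 * A0 - (29 * mult) * ct + cn := by ring
      _ ≡ 29 * A1 - 29 ^ n * 29 * A0 - 29 ^ n * ct + cn [ZMOD p] :=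
          (((Int.ModEq.refl _).sub (hM.mul_right ct)).add_right cn)
      _ = 29 * A1 + cn - 29 ^ (n + 1) * A0 - 29 ^ n * ct := by ring
  have hR : Int.ModEq p (pvPref c p (t + 1 + n) - pvPref c p (t + 1) * pw)
      (29 * A1 + cn - 29 ^ (n + 1) * A0 - 29 ^ n * ct) := by
    have e1 : t + 1 + n = t + n + 1 := by omega
    rw [e1, hA1, hA0]
    calc (A1 * 29 + cn).fmod p - (A0 * 29 + ct).fmod p * pw
        ≡ (A1 * 29 + cn) - (A0 * 29 + ct) * (29 ^ n) [ZMOD p] :=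
          (pvFmodModEq p _).sub ((pvFmodModEq p _).mul hpw)
      _ = 29 * A1 + cn - 29 ^ (n + 1) * A0 - 29 ^ n * ct := by ring
  exact hL.trans hR.symm

-- key zero: the prefix hash of the first window is the subtraction formula at i = 0
lemma pvKeyZero (c : List Int) (p pw : Int) (n : ℕ) (hn : n ≤ c.length) :
    pvKey c p pw n 0 = pvPref c p n := by
  unfold pvKey
  rw [pvPref_zero]
  simpa [pvModIsFmod] using pvPref_fmod c p n hn

-- the main loop: A's (w, d) fold and B's d fold stay in lockstep
lemma pvMainLoop (c : List Int) (p mult pw : Int) (n : ℕ)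
    (hM : Int.ModEq p (29 * mult) (29 ^ n)) (hpw : Int.ModEq p pw (29 ^ n))
    (hn : n ≤ c.length) :
    ∀ (t : ℕ), t ≤ c.length - n → ∀ (d0 : PySem.Dict Int (Int × Int)),
    (PySem.List.pyRange 1 (1 + (t : Int)) 1).foldl (pvAStep c mult p (n : Int)) (pvPref c p n, d0)
      = (pvKey c p pw n t,
         (PySem.List.pyRange 1 (1 + (t : Int)) 1).foldl
           (pvBStep (List.scanl (pvStep p) 0 c) pw p (n : Int)) d0) := by
  intro t
  induction t with
  | zero =>
      intro _ d0
      simp [PySem.List.pyRange_one_eq_nil, pvKeyZero c p pw n hn]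
  | succ m ih =>
      intro hm d0
      have hm' : m ≤ c.length - n := by omega
      have h1 : (1 + ((m + 1 : ℕ) : Int)) = (1 + (m : Int)) + 1 := by omega
      rw [h1, PySem.List.pyRange_one_succ_right (by omega), List.foldl_append,
          List.foldl_append, ih hm' d0]
      have hwv : PySem.Int.mod ((pvKey c p pw n m - mult * PySem.List.pyGetD c ((1 + (m : Int)) - 1) 0) * 29
          + PySem.List.pyGetD c ((1 + (m : Int)) + (n : Int) - 1) 0) p = pvKey c p pw n (m + 1) := by
        have e1 : (1 + (m : Int)) - 1 = ((m : ℕ) : Int) := by push_cast; ring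
        have e2 : (1 + (m : Int)) + (n : Int) - 1 = ((m + n : ℕ) : Int) := by push_cast; ring
        rw [e1, e2, PySem.List.pyGetD_natCast, PySem.List.pyGetD_natCast]
        exact pvKeyStep c p mult pw n m hM hpw (by omega)
      have hbk : PySem.Int.mod (PySem.List.pyGetD (List.scanl (pvStep p) 0 c) ((1 + (m : Int)) + (n : Int)) 0
          - PySem.List.pyGetD (List.scanl (pvStep p) 0 c) (1 + (m : Int)) 0 * pw) p
          = pvKey c p pw n (m + 1) := by
        have e1 : (1 + (m : Int)) + (n : Int) = ((m + 1 + n : ℕ) : Int) := by push_cast; ring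
        have e2 : (1 + (m : Int)) = ((m + 1 : ℕ) : Int) := by push_cast; ring
        rw [e1, e2, pvHgetD c p (m + 1 + n) (by omega), pvHgetD c p (m + 1) (by omega)]
        rfl
      simp only [List.foldl_cons, List.foldl_nil, pvAStep, pvBStep]
      rw [hwv, hbk]

-- assembling the pieces: for win_len = n ≥ 0 within bounds the two ports agree
lemma pvPortsEq (s : String) (p : Int) (n : ℕ)
    (h29 : n = 0 → ¬ ((29:Int) ∣ p))
    (hn : n ≤ (s.toList.map (fun ch => (ch.toNat : Int))).length) :
    get_substr_hashes s (n : Int) p = get_substr_hashes_alt s (n : Int) p := by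
  set c : List Int := s.toList.map (fun ch => (ch.toNat : Int)) with hc
  have hpwe : pyPow3 29 (n : Int) p = ((29:ℤ) ^ n).fmod p := by
    simp [pyPow3, PySem.Int.powMod, pvModIsFmod]
  have hpw : Int.ModEq p (pyPow3 29 (n : Int) p) (29 ^ n) := by
    rw [hpwe]; exact pvFmodModEq p _
  have hM : Int.ModEq p (29 * pyPow3 29 ((n : Int) - 1) p) (29 ^ n) := by
    rcases Nat.eq_zero_or_pos n with h0 | h0
    · subst h0
      have hg : Int.gcd 29 p = 1 := by
        have hd : Int.gcd 29 p ∣ 29 := by exact_mod_cast Int.gcd_dvd_left 29 p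
        rcases (Nat.Prime.eq_one_or_self_of_dvd (by norm_num) _ hd) with h | h
        · exact h
        · exfalso
          apply h29 rfl
          have := Int.gcd_dvd_right 29 p
          rwa [h] at this
          
      have hb : (1:ℤ) = 29 * Int.gcdA 29 p + p * Int.gcdB 29 p := by
        have h2 := Int.gcd_eq_gcd_ab 29 p
        rw [hg] at h2
        exact_mod_cast h2
      have hpp : pyPow3 29 ((0:ℕ) - 1 : Int) p = (Int.gcdA 29 p).fmod p := by
        norm_num [pyPow3, pvModIsFmod]
      rw [hpp]
      have h1 : Int.ModEq p (29 * Int.gcdA 29 p) 1 :=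
        Int.modEq_iff_dvd.mpr ⟨Int.gcdB 29 p, by linarith⟩
      simpa using ((pvFmodModEq p (Int.gcdA 29 p)).mul_left 29).trans h1
    · have he : ((n:Int) - 1) = ((n - 1 : ℕ) : Int) := by omega
      have hm1 : pyPow3 29 ((n:Int) - 1) p = ((29:ℤ) ^ (n - 1)).fmod p := by
        rw [he]; simp [pyPow3, PySem.Int.powMod, pvModIsFmod]
      rw [hm1]
      have h2 : Int.ModEq p (29 * ((29:ℤ) ^ (n - 1)).fmod p) (29 * 29 ^ (n - 1)) :=
        (pvFmodModEq p _).mul_left 29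
      have he2 : (29:ℤ) * 29 ^ (n - 1) = 29 ^ n := by
        rw [← pow_succ']
        congr 1
        omega
      rwa [he2] at h2
  have hA0 : (PySem.List.pyRange 0 ((n:Int)) 1).foldl
      (fun w i => PySem.Int.mod (29 * w + PySem.List.pyGetD c i 0) p) 0 = pvPref c p n :=
    pvFirstWin c p n hn
  have hB0 : PySem.List.pyGetD (List.scanl (pvStep p) 0 c) ((n:Int)) 0 = pvPref c p n :=
    pvHgetD c p n hn
  have hrange : PySem.List.len c - (n:Int) + 1 = 1 + ((c.length - n : ℕ) : Int) := by
    rw [PySem.List.len_eq]; omega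
  have hmain := pvMainLoop c p (pyPow3 29 ((n:Int) - 1) p) (pyPow3 29 (n:Int) p) n hM hpw hn
      (c.length - n) le_rfl (PySem.Dict.empty.insert (pvPref c p n) (0, (n:Int)))
  simp only [get_substr_hashes, get_substr_hashes_alt]
  rw [← hc, pvHeq p c, hA0, hB0, hrange, hmain]

-- ===== VERDICT (by name: the statement is the Claim_ definition above) =====
theorem get_substr_hashes_spec : Claim_equal_get_substr_hashes := by
  intro s win_len p _ hpre
  obtain ⟨h0, h1, hp, h29⟩ := hpre
  unfold Spec_get_substr_hashes
  have hW : win_len = ((win_len.toNat : ℕ) : Int) := (Int.toNat_of_nonneg h0).symm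
  rw [hW]
  apply pvPortsEq s p win_len.toNat
  · intro hn0
    apply h29
    omega
  · rw [PySem.Str.len_eq] at h1
    simp only [List.length_map]
    omega
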